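-- pv_equiv track=rewrite | github.com/kgasperich/qmcpack-qp | qp_convert_qmcpack_to_ezfio.py | expend_sym_str
-- ===== SOURCE A (Python) =====
-- def expend_sym_str(str_):
--     #Expend x2 -> xx
--     # yx2 -> xxy
--     for i, c in enumerate(str_):
--         try:
--             n = int(c)
--         except ValueError:
--             pass
--         else:
--             str_ = str_[:i - 1] + str_[i - 1] * n + str_[i + 1:]
--
--     #Order by frequency
--     return "".join(sorted(str_, key=str_.count, reverse=True))
-- ===== SOURCE B (Python) =====
-- def expend_sym_str(str_):
--     # Same expansion as the original (including its index-into-the-mutated-string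
--     # behaviour), but the frequency ordering is done by a counting/bucket pass
--     # instead of a comparison sort with an O(n) count() key.
--     s = str_
--     for i, c in enumerate(str_):
--         if '0' <= c <= '9':
--             n = ord(c) - 48
--             s = s[:i - 1] + s[i - 1] * n + s[i + 1:]
--     cnt = {}
--     for ch in s:
--         cnt[ch] = cnt.get(ch, 0) + 1
--     buckets = [[] for _ in range(len(s) + 1)]
--     for ch in s:
--         buckets[cnt[ch]].append(ch)
--     out = []
--     for k in range(len(s), 0, -1):
--         out.extend(buckets[k])
--     return "".join(out)
-- ===== Notes on version B (the rewrite author's own statement) =====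
-- stated objective: faster
-- what changed: B keeps the expansion loop identical but replaces the comparison sort with an O(n) str_.count key (sorted(str_, key=str_.count, reverse=True)) by a single counting pass plus bucket assembly: each character is appended to the bucket of its frequency and the buckets are concatenated in descending frequency, reproducing the stable reverse-sort order without any sort.
import Mathlib
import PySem

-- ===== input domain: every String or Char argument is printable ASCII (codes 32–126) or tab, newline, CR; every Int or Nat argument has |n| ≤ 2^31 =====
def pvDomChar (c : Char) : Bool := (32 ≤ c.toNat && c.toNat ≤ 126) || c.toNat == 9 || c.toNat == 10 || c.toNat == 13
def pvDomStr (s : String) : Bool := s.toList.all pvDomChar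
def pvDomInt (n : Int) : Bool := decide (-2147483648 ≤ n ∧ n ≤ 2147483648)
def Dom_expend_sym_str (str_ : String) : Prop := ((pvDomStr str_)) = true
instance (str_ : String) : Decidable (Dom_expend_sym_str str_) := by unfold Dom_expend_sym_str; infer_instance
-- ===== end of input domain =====

-- B keeps A's expansion loop and replaces `sorted(key=str_.count, reverse=True)` by a
-- counting pass plus descending-frequency bucket assembly (no comparison sort).

-- ===== PORT A =====
def expend_sym_str (str_ : String) : String :=
  -- for i, c in enumerate(str_): if int(c) succeeds: str_ = str_[:i-1] + str_[i-1]*n + str_[i+1:]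
  -- (str_[i-1] can raise IndexError: exactly those inputs are excluded by Pre_ below,
  --  so pyGetD is exact here)
  let s := (PySem.List.enumerate str_.toList 0).foldl (fun s p =>
      if '0' ≤ p.2 ∧ p.2 ≤ '9' then
        PySem.List.slice s none (some (p.1 - 1)) ++
        PySem.List.pyRepeat [PySem.List.pyGetD s (p.1 - 1) ' '] ((p.2.toNat : Int) - 48) ++
        PySem.List.slice s (some (p.1 + 1)) none
      else s) str_.toList
  -- return "".join(sorted(str_, key=str_.count, reverse=True))
  String.ofList (PySem.List.sorted s (fun c => (PySem.List.count s c : Int)) true)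

-- ===== PORT B =====
def expend_sym_str_alt (str_ : String) : String :=
  -- same expansion loop as A (B's Python keeps it verbatim)
  let s := (PySem.List.enumerate str_.toList 0).foldl (fun s p =>
      if '0' ≤ p.2 ∧ p.2 ≤ '9' then
        PySem.List.slice s none (some (p.1 - 1)) ++
        PySem.List.pyRepeat [PySem.List.pyGetD s (p.1 - 1) ' '] ((p.2.toNat : Int) - 48) ++
        PySem.List.slice s (some (p.1 + 1)) none
      else s) str_.toList
  -- cnt = {}; for ch in s: cnt[ch] = cnt.get(ch, 0) + 1
  let cnt := s.foldl (fun d c => PySem.Dict.modify d c 0 (· + 1)) (PySem.Dict.empty : PySem.Dict Char Int)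
  -- buckets = [[] for _ in range(len(s)+1)]; for ch in s: buckets[cnt[ch]].append(ch)
  let buckets := s.foldl (fun bs c =>
      PySem.List.pySetD bs (PySem.Dict.getD cnt c 0)
        (PySem.List.pyGetD bs (PySem.Dict.getD cnt c 0) [] ++ [c]))
      (List.replicate (s.length + 1) ([] : List Char))
  -- out = []; for k in range(len(s), 0, -1): out.extend(buckets[k]); return "".join(out)
  let out := (PySem.List.pyRange (s.length : Int) 0 (-1)).foldl
      (fun acc k => acc ++ PySem.List.pyGetD buckets k []) []
  String.ofList out

-- ===== PRECONDITION & SPEC =====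
-- Pre_ excludes exactly the inputs on which Python's `str_[i - 1]` raises IndexError
-- (the mutated string can shrink below the running index when it contains digits 0 or 1).
-- pvPreAux tracks only the RUNNING LENGTH of the mutated string — a closed arithmetic
-- recurrence over the input characters, not a re-simulation of the algorithm's state.
def pvPreAux (len : Int) (i : Nat) : List Char → Bool
  | [] => true
  | c :: rest =>
      if '0' ≤ c ∧ c ≤ '9' then
        let n : Int := (c.toNat : Int) - 48
        if i = 0 then
          decide (1 ≤ len) && pvPreAux (2 * len - 2 + n) 1 rest
        else
          decide ((i : Int) - 1 < len) &&
            pvPreAux ((i : Int) - 1 + n + max (len - (i : Int) - 1) 0) (i + 1) rest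
      else pvPreAux len (i + 1) rest

def Pre_expend_sym_str (str_ : String) : Prop :=
  pvPreAux (str_.toList.length : Int) 0 str_.toList = true

instance (str_ : String) : Decidable (Pre_expend_sym_str str_) := by
  unfold Pre_expend_sym_str; infer_instance

def pvWitness_expend_sym_str : String := "ab2cc3"

def Spec_expend_sym_str (str_ : String) (out : String) : Prop := out = expend_sym_str_alt str_
instance (str_ : String) (out : String) : Decidable (Spec_expend_sym_str str_ out) := by
  unfold Spec_expend_sym_str; infer_instance

-- ===== CLAIM (what is proved, stated in full; the proofs are below) =====
def Claim_equal_expend_sym_str : Prop := ∀ (str_ : String), Dom_expend_sym_str str_ → Pre_expend_sym_str str_ → Spec_expend_sym_str str_ (expend_sym_str str_)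

-- ===== LEMMAS AND PROOFS =====

-- inserting x into A ++ B when x must go past all of A and before all of B
theorem pv_insertBy_middle {α : Type} (before : α → α → Bool) (x : α) (A B : List α)
    (hA : ∀ y ∈ A, before x y = false) (hB : ∀ y ∈ B, before x y = true) :
    PySem.List.insertBy before x (A ++ B) = A ++ x :: B := by
  induction A with
  | nil =>
      cases B with
      | nil => simp [PySem.List.insertBy]
      | cons b bs => simp [PySem.List.insertBy, hB b (by simp)]
  | cons a A ih =>
      have ha : before x a = false := hA a (by simp)
      simp only [List.cons_append, PySem.List.insertBy, ha, Bool.false_eq_true, if_false]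
      exact congrArg (a :: ·) (ih (fun y hy => hA y (by simp [hy])))

-- one insertion step preserves the descending-bucket decomposition
theorem pv_insert_buckets {α : Type} (key : α → Int) (ks : List Int)
    (hks : ks.Pairwise (· > ·)) (x : α) (hx : key x ∈ ks) (pre : List α) :
    PySem.List.insertBy (fun a b => decide (key b < key a)) x
      (ks.flatMap (fun k => pre.filter (fun y => decide (key y = k))))
    = ks.flatMap (fun k => (pre ++ [x]).filter (fun y => decide (key y = k))) := by
  obtain ⟨ks₁, ks₂, rfl⟩ := List.append_of_mem hx
  rw [List.pairwise_append] at hks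
  obtain ⟨-, hk2, h12⟩ := hks
  rw [List.pairwise_cons] at hk2
  have h1 : ∀ k ∈ ks₁, key x < k := fun k hk => h12 k hk (key x) (by simp)
  have h2 : ∀ k ∈ ks₂, k < key x := fun k hk => hk2.1 k hk
  simp only [List.flatMap_append, List.flatMap_cons]
  rw [← List.append_assoc]
  rw [pv_insertBy_middle]
  · have e1 : ks₁.flatMap (fun k => (pre ++ [x]).filter (fun y => decide (key y = k)))
        = ks₁.flatMap (fun k => pre.filter (fun y => decide (key y = k))) := by
      refine List.flatMap_congr (fun k hk => ?_)
      rw [List.filter_append]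
      simp [ne_of_lt (h1 k hk)]
    have e2 : ks₂.flatMap (fun k => (pre ++ [x]).filter (fun y => decide (key y = k)))
        = ks₂.flatMap (fun k => pre.filter (fun y => decide (key y = k))) := by
      refine List.flatMap_congr (fun k hk => ?_)
      rw [List.filter_append]
      simp [ne_of_gt (h2 k hk)]
    have e3 : (pre ++ [x]).filter (fun y => decide (key y = key x))
        = pre.filter (fun y => decide (key y = key x)) ++ [x] := by
      rw [List.filter_append]; simp
    rw [e1, e2, e3]
    simp [List.append_assoc]
  · intro y hy
    simp only [List.mem_append] at hy
    rcases hy with hy | hy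
    · obtain ⟨k, hk, hyk⟩ := List.mem_flatMap.mp hy
      have hyk' : key y = k := of_decide_eq_true (List.mem_filter.mp hyk).2
      simp [hyk', not_lt.mpr (le_of_lt (h1 k hk))]
    · have hyk' : key y = key x := of_decide_eq_true (List.mem_filter.mp hy).2
      simp [hyk']
  · intro y hy
    obtain ⟨k, hk, hyk⟩ := List.mem_flatMap.mp hy
    have hyk' : key y = k := of_decide_eq_true (List.mem_filter.mp hyk).2
    simp [hyk', h2 k hk]

-- Python's stable reverse sort = concatenation of original-order buckets along any
-- strictly descending list of keys covering the list
theorem pv_sorted_rev_buckets {α : Type} (s : List α) (key : α → Int) (ks : List Int)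
    (hks : ks.Pairwise (· > ·)) (hcov : ∀ x ∈ s, key x ∈ ks) :
    PySem.List.sorted s key true
      = ks.flatMap (fun k => s.filter (fun y => decide (key y = k))) := by
  rw [PySem.List.sorted_rev_eq_foldl_insertBy]
  induction s using List.reverseRecOn with
  | nil => simp
  | append_singleton s' x ih =>
      rw [List.foldl_append, List.foldl_cons, List.foldl_nil,
        ih (fun y hy => hcov y (by simp [hy]))]
      exact pv_insert_buckets key ks hks x (hcov x (by simp)) s'

theorem pv_set_map_range {β : Type} (n m : Nat) (g : Nat → β) (v : β) :
    ((List.range n).map g).set m v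
      = (List.range n).map (fun (k : Nat) => if k = m then v else g k) := by
  apply List.ext_getElem
  · simp
  · intro i h1 h2
    simp only [List.getElem_set, List.getElem_map, List.getElem_range]
    rcases eq_or_ne m i with h | h
    · subst h; simp
    · simp [h, Ne.symm h]

-- the bucket-filling fold computes the per-count filters
theorem pv_bucket_fold {α : Type} (cnt : α → Int) (n : Nat) (rest : List α)
    (h : ∀ c ∈ rest, 0 ≤ cnt c ∧ cnt c ≤ (n : Int)) : ∀ (pre : List α),
    rest.foldl (fun bs c =>
        PySem.List.pySetD bs (cnt c) (PySem.List.pyGetD bs (cnt c) [] ++ [c]))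
      ((List.range (n + 1)).map (fun (k : Nat) => pre.filter (fun y => decide (cnt y = (k : Int)))))
    = (List.range (n + 1)).map (fun (k : Nat) => (pre ++ rest).filter (fun y => decide (cnt y = (k : Int)))) := by
  induction rest with
  | nil => intro pre; simp
  | cons c rest ih =>
      intro pre
      obtain ⟨hc0, hcn⟩ := h c (by simp)
      have hmn : (cnt c).toNat < n + 1 := by omega
      have hcast : ((cnt c).toNat : Int) = cnt c := Int.toNat_of_nonneg hc0
      rw [List.foldl_cons]
      have hlen : (cnt c) < (((List.range (n+1)).map
          (fun (k : Nat) => pre.filter (fun y => decide (cnt y = (k : Int))))).length : Int) := by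
        simp; omega
      rw [PySem.List.pyGetD_eq_getElem _ _ hc0 hlen,
        PySem.List.pySetD_of_nonneg _ _ hc0]
      simp only [List.getElem_map, List.getElem_range]
      rw [pv_set_map_range]
      have hstep : (List.range (n+1)).map (fun (k : Nat) =>
            if k = (cnt c).toNat then
              pre.filter (fun y => decide (cnt y = ((cnt c).toNat : Int))) ++ [c]
            else pre.filter (fun y => decide (cnt y = (k : Int))))
          = (List.range (n+1)).map (fun (k : Nat) =>
              (pre ++ [c]).filter (fun y => decide (cnt y = (k : Int)))) := by
        refine List.map_congr_left (fun k hk => ?_)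
        rw [List.filter_append]
        by_cases hkm : k = (cnt c).toNat
        · subst hkm
          simp [hcast]
        · have hne : cnt c ≠ (k : Int) := by
            intro hE; apply hkm; omega
          simp [hkm, hne]
      rw [hstep, ih (fun y hy => h y (by simp [hy])) (pre ++ [c])]
      simp

theorem pv_pyRange_down (n : Nat) :
    PySem.List.pyRange (n : Int) 0 (-1) = (List.range n).map (fun (j : Nat) => (n : Int) - (j : Int)) := by
  simp only [PySem.List.pyRange, if_neg (by decide : ¬((-1:Int) = 0)),
    if_neg (by decide : ¬((0:Int) < -1))]
  by_cases h : (0 : Int) < (n : Int)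
  · rw [if_pos h]
    have hc : (((n:Int) - 0 + -(-1) - 1) / -(-1)).toNat = n := by simp
    rw [hc]
    exact List.map_congr_left fun k hk => by ring
  · rw [if_neg h]
    have hn : n = 0 := by omega
    subst hn; simp

-- the whole post-expansion pipeline: A's sorted-by-count = B's bucket assembly
theorem pv_main (s : List Char) :
    String.ofList (PySem.List.sorted s (fun c => (PySem.List.count s c : Int)) true)
    = String.ofList ((PySem.List.pyRange (s.length : Int) 0 (-1)).foldl
        (fun acc k => acc ++ PySem.List.pyGetD
          (s.foldl (fun bs c =>
              PySem.List.pySetD bs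
                (PySem.Dict.getD (s.foldl (fun d c => PySem.Dict.modify d c 0 (· + 1)) (PySem.Dict.empty : PySem.Dict Char Int)) c 0)
                (PySem.List.pyGetD bs
                  (PySem.Dict.getD (s.foldl (fun d c => PySem.Dict.modify d c 0 (· + 1)) (PySem.Dict.empty : PySem.Dict Char Int)) c 0) [] ++ [c]))
            (List.replicate (s.length + 1) ([] : List Char)))
          k []) []) := by
  refine congrArg String.ofList ?_
  have hcnt : ∀ c, PySem.Dict.getD (s.foldl (fun d c => PySem.Dict.modify d c 0 (· + 1)) (PySem.Dict.empty : PySem.Dict Char Int)) c 0 = (List.count c s : Int) :=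
    fun c => by simpa using PySem.Dict.getD_foldl_modify_add_one s PySem.Dict.empty c
  -- the bucket list
  have hbk : s.foldl (fun bs c =>
        PySem.List.pySetD bs
          (PySem.Dict.getD (s.foldl (fun d c => PySem.Dict.modify d c 0 (· + 1)) (PySem.Dict.empty : PySem.Dict Char Int)) c 0)
          (PySem.List.pyGetD bs
            (PySem.Dict.getD (s.foldl (fun d c => PySem.Dict.modify d c 0 (· + 1)) (PySem.Dict.empty : PySem.Dict Char Int)) c 0) [] ++ [c]))
        (List.replicate (s.length + 1) ([] : List Char))
      = (List.range (s.length + 1)).map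
          (fun (k : Nat) => s.filter (fun y => decide ((List.count y s : Int) = (k : Int)))) := by
    rw [PySem.List.foldl_congr_mem _ _
      (fun bs c => PySem.List.pySetD bs ((List.count c s : Int))
        (PySem.List.pyGetD bs ((List.count c s : Int)) [] ++ [c])) _
      (fun acc c hc => by rw [hcnt c])]
    have h0 : (List.replicate (s.length + 1) ([] : List Char))
        = (List.range (s.length + 1)).map
            (fun (k : Nat) => ([] : List Char).filter (fun y => decide ((List.count y s : Int) = (k : Int)))) := by
      simp [List.map_const']
    rw [h0, pv_bucket_fold (fun c => (List.count c s : Int)) s.length s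
      (fun c hc => ⟨by exact Int.natCast_nonneg _,
        by show (List.count c s : Int) ≤ (s.length : Int)
           exact_mod_cast List.count_le_length (l := s) (a := c)⟩) []]
    simp
  rw [hbk, pv_pyRange_down, PySem.List.foldl_append_eq_flatMap, List.nil_append,
    List.flatMap_map]
  -- right side is now buckets read off descending counts n, n-1, …, 1
  have hright : (List.range s.length).flatMap
        (fun (j : Nat) => PySem.List.pyGetD
          ((List.range (s.length + 1)).map
            (fun (k : Nat) => s.filter (fun y => decide ((List.count y s : Int) = (k : Int)))))
          ((s.length : Int) - (j : Int)) [])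
      = (List.range s.length).flatMap
          (fun (j : Nat) => s.filter (fun y => decide ((List.count y s : Int) = (s.length : Int) - (j : Int)))) := by
    refine List.flatMap_congr (fun j hj => ?_)
    have hjn : j < s.length := List.mem_range.mp hj
    have h0 : (0 : Int) ≤ (s.length : Int) - (j : Int) := by omega
    have h1 : (s.length : Int) - (j : Int) < (((List.range (s.length + 1)).map
        (fun (k : Nat) => s.filter (fun y => decide ((List.count y s : Int) = (k : Int))))).length : Int) := by
      simp only [List.length_map, List.length_range]
      omega
    rw [PySem.List.pyGetD_eq_getElem _ _ h0 h1]
    simp only [List.getElem_map, List.getElem_range]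
    have he : ((((s.length : Int) - (j : Int)).toNat : Int)) = (s.length : Int) - (j : Int) := by omega
    rw [he]
  rw [hright]
  -- left side via the bucket characterisation of the stable reverse sort
  simp only [PySem.List.count_eq]
  rw [pv_sorted_rev_buckets s (fun c => (List.count c s : Int))
    ((List.range s.length).map (fun (j : Nat) => (s.length : Int) - (j : Int)))
    (List.pairwise_map.mpr (List.pairwise_lt_range.imp (fun {a b} hab => by simp; omega)))
    (fun x hx => by
      refine List.mem_map.mpr ⟨s.length - (List.count x s), List.mem_range.mpr ?_, ?_⟩
      · have := List.count_pos_iff.mpr hx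
        have := List.count_le_length (l := s) (a := x)
        omega
      · have := List.count_le_length (l := s) (a := x)
        push_cast [Nat.cast_sub this]
        ring),
    List.flatMap_map]

-- ===== VERDICT (by name: the statement is the Claim_ definition above) =====
theorem expend_sym_str_spec : Claim_equal_expend_sym_str := by
  intro str_ _ _
  unfold Spec_expend_sym_str expend_sym_str expend_sym_str_alt
  exact pv_main _
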